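-- pv_equiv track=rewrite | github.com/snagpal93/GoogleFooBar | fuel-injection-perfection.py | removeOne
-- ===== SOURCE A (Python) =====
-- def removeOne(n):
--     result = ''
--     i = len(n) - 1
--
--     while(n[i]=='0' and i >= 0):
--         i = i  - 1
--
--     result = '9' * (len(n) - i -1)
--
--     if (i==-1):
--         return 'INVALID'
--
--     result = str(int(n[i]) - 1) + result
--     i = i - 1
--
--     if (i>=0):
--         result = n[0:i+1] + result
--
--     return result
-- ===== SOURCE B (Python) =====
-- def removeOne(n):
--     # right-to-left borrow subtraction: walk digits from the end carrying a
--     # borrow, turning trailing '0's into '9's, until one digit absorbs the borrow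
--     out = []
--     i = len(n)
--     borrow = 1
--     while borrow and i > 0:
--         i -= 1
--         v = int(n[i]) - borrow
--         if v < 0:
--             v += 10
--         else:
--             borrow = 0
--         out.append(str(v))
--     if borrow:
--         return 'INVALID'
--     return n[:i] + ''.join(reversed(out))
-- ===== Notes on version B (the rewrite author's own statement) =====
-- stated objective: alternative
-- what changed: A first scans to locate the last nonzero digit and then assembles the answer from slices and a replicated-nines pad; B is a single right-to-left borrow-subtraction loop that rewrites each trailing zero digit to a nine via (digit minus one) plus ten and stops as soon as one digit absorbs the borrow, reporting INVALID only if the borrow survives the whole string.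
-- outside the precondition, e.g. on removeOne(''): A raises IndexError, B returns 'INVALID'
import Mathlib
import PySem

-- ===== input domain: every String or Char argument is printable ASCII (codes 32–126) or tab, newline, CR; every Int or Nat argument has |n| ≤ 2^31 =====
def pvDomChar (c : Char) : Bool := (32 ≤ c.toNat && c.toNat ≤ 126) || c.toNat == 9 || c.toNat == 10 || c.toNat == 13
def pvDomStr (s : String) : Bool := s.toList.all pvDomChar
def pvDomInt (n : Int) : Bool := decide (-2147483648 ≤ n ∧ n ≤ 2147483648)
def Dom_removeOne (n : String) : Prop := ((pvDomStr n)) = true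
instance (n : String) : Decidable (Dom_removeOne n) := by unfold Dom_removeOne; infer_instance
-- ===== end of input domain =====

-- B replaces A's locate-then-assemble (scan for last non-zero, then slices + '9'*k pad) by a
-- single right-to-left borrow-subtraction loop (objective: alternative); A = B is proved on Pre_.

-- ===== PORT A =====
-- while(n[i]=='0' and i >= 0): i = i - 1   — Python evaluates n[i] first (negative i wraps);
-- pyGet? = none is Python's IndexError (only reachable for n = '', excluded by Pre_), the loop then stops.
def aLoop (L : List Char) (i : Int) : Int :=
  if h : PySem.List.pyGet? L i = some '0' ∧ 0 ≤ i then aLoop L (i - 1) else i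
termination_by (i + 1).toNat
decreasing_by
  have := h.2; omega

def removeOne (n : String) : String :=
  let L := n.toList
  let i0 := aLoop L ((L.length : Int) - 1)
  let result := String.ofList (List.replicate ((L.length : Int) - i0 - 1).toNat '9')
  if i0 = -1 then "INVALID"
  else
    -- n[i]: in-range here whenever Pre_ holds; int(n[i]) = ofStr?, none = ValueError (excluded by Pre_)
    let c := PySem.List.pyGetD L i0 ' '
    let d := (PySem.Int.ofStr? (String.ofList [c])).getD 0
    let result := PySem.Int.toStr (d - 1) ++ result
    let i1 := i0 - 1
    if 0 ≤ i1 then String.ofList (PySem.List.slice L (some 0) (some (i1 + 1))) ++ result else result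

-- ===== PORT B =====
-- while borrow and i > 0: … — structural recursion on i; each str(v) is kept as its char list and
-- ''.join(reversed(out)) is ported by hand as out.reverse.flatten (exact: join with empty separator).
-- int(n[i]) = ofStr?, none = ValueError (excluded by Pre_, exactly as in A's port).
def bLoop (L : List Char) (i : Nat) (out : List (List Char)) : Nat × List (List Char) × Bool :=
  match i with
  | 0 => (0, out, true)
  | i' + 1 =>
    let d := (PySem.Int.ofStr? (String.ofList [PySem.List.pyGetD L (i' : Int) ' '])).getD 0
    let v := d - 1
    if v < 0 then bLoop L i' (out ++ [(PySem.Int.toStr (v + 10)).toList])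
    else (i', out ++ [(PySem.Int.toStr v).toList], false)

def removeOne_alt (n : String) : String :=
  let L := n.toList
  let r := bLoop L L.length []
  if r.2.2 then "INVALID"
  else String.ofList (L.take r.1) ++ String.ofList r.2.1.reverse.flatten

-- ===== PRECONDITION & SPEC =====
-- Pre_ excludes exactly the inputs where Python A raises: the empty string (IndexError) and
-- strings whose rightmost nonzero-digit character is not a decimal digit (ValueError from int()).
def Pre_removeOne (n : String) : Prop :=
  n ≠ "" ∧ ((n.toList.reverse.dropWhile (fun c => c = '0')).headD '1')
             ∈ ['1', '2', '3', '4', '5', '6', '7', '8', '9']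
instance (n : String) : Decidable (Pre_removeOne n) := by unfold Pre_removeOne; infer_instance
def pvWitness_removeOne : String := "10"

def Spec_removeOne (n : String) (out : String) : Prop := out = removeOne_alt n
instance (n : String) (out : String) : Decidable (Spec_removeOne n out) := by unfold Spec_removeOne; infer_instance

-- ===== CLAIM (what is proved, stated in full; the proofs are below) =====
def Claim_equal_removeOne : Prop := ∀ (n : String), Dom_removeOne n → Pre_removeOne n → Spec_removeOne n (removeOne n)

-- ===== LEMMAS AND PROOFS =====

lemma aLoop_neg (L : List Char) (i : Int) (h : i < 0) : aLoop L i = i := by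
  rw [aLoop, dif_neg]
  rintro ⟨-, h2⟩; omega

lemma aLoop_zeros (L : List Char) (hL : ∀ c ∈ L, c = '0') :
    ∀ j : Nat, j ≤ L.length → aLoop L ((j : Int) - 1) = -1 := by
  intro j
  induction j with
  | zero => intro _; simpa using aLoop_neg L (-1) (by omega)
  | succ k ih =>
    intro hk
    rw [aLoop, dif_pos, show ((k + 1 : Nat) : Int) - 1 - 1 = (k : Int) - 1 by push_cast; ring]
    · exact ih (by omega)
    · constructor
      · rw [show ((k + 1 : Nat) : Int) - 1 = (k : Int) from by push_cast; ring,
            PySem.List.pyGet?_natCast]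
        have hk' : k < L.length := by omega
        simp [List.getElem?_eq_getElem hk', hL _ (List.getElem_mem hk')]
      · omega

lemma aLoop_find (P : List Char) (c : Char) (Z : List Char) (hc : c ≠ '0')
    (hZ : ∀ x ∈ Z, x = '0') :
    ∀ j : Nat, j ≤ Z.length → aLoop (P ++ c :: Z) ((P.length : Int) + j) = P.length := by
  intro j
  induction j with
  | zero =>
    intro _
    rw [aLoop, dif_neg]
    · simp
    · rintro ⟨h1, -⟩
      rw [show ((P.length : Int) + (0:Nat)) = (P.length : Int) by push_cast; ring,
          PySem.List.pyGet?_append_length] at h1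
      exact hc (by simpa using h1)
  | succ k ih =>
    intro hk
    rw [aLoop, dif_pos, show (P.length : Int) + ((k+1 : Nat) : Int) - 1 = (P.length : Int) + (k : Int) by push_cast; ring]
    · exact ih (by omega)
    · constructor
      · have : ((P.length : Int) + ((k + 1 : Nat) : Int)) = (((P.length + (k + 1) : Nat)) : Int) := by push_cast; ring
        rw [this, PySem.List.pyGet?_natCast]
        have hk' : k < Z.length := by omega
        have : (P ++ c :: Z)[P.length + (k + 1)]? = Z[k]? := by
          rw [List.getElem?_append_right (by omega)]
          simp
        rw [this]
        simp [List.getElem?_eq_getElem hk', hZ _ (List.getElem_mem hk')]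
      · positivity

lemma bLoop_zeros (P Z : List Char) (hZ : ∀ x ∈ Z, x = '0') :
    ∀ m : Nat, m ≤ Z.length → ∀ out,
      bLoop (P ++ Z) (P.length + m) out = bLoop (P ++ Z) P.length (out ++ List.replicate m ['9']) := by
  intro m
  induction m with
  | zero => intro _ out; simp
  | succ k ih =>
    intro hk out
    have hchar : PySem.List.pyGetD (P ++ Z) ((P.length + k : Nat) : Int) ' ' = '0' := by
      rw [PySem.List.pyGetD_natCast]
      have hk' : k < Z.length := by omega
      rw [List.getD, List.getElem?_append_right (by omega)]
      simp [List.getElem?_eq_getElem hk', hZ _ (List.getElem_mem hk')]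
    have hstep : P.length + (k + 1) = (P.length + k) + 1 := by omega
    rw [hstep]
    show bLoop (P ++ Z) ((P.length + k) + 1) out = _
    rw [bLoop]
    simp only [show ((P.length + k : Nat) : Int) = ((P.length : Int) + (k : Int)) by push_cast; ring] at hchar ⊢
    rw [hchar]
    norm_num
    rw [ih (by omega)]
    simp [List.replicate_succ, List.append_assoc]
    rw [if_pos (by decide : (PySem.Int.ofChars? ['0']).getD 0 < 1),
        show PySem.Int.toChars ((PySem.Int.ofChars? ['0']).getD 0 - 1 + 10) = ['9'] from by decide]

lemma digit_sub_nonneg (c : Char)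
    (h : c ∈ ['1', '2', '3', '4', '5', '6', '7', '8', '9']) :
    ¬ ((PySem.Int.ofStr? (String.ofList [c])).getD 0 - 1 < 0) := by
  fin_cases h <;> decide

-- ===== VERDICT (by name: the statement is the Claim_ definition above) =====
theorem removeOne_spec : Claim_equal_removeOne := by
  intro n _ hPre
  obtain ⟨hne, hdig⟩ := hPre
  unfold Spec_removeOne
  rcases hD : n.toList.reverse.dropWhile (fun c => c = '0') with - | ⟨c, rest⟩
  · -- all characters are '0': both sides return "INVALID"
    have hall : ∀ x ∈ n.toList, x = '0' := fun x hx => by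
      simpa using List.dropWhile_eq_nil_iff.mp hD x (List.mem_reverse.mpr hx)
    have h1 : aLoop n.toList ((n.toList.length : Int) - 1) = -1 :=
      aLoop_zeros _ hall n.toList.length le_rfl
    have h2 : bLoop n.toList n.toList.length [] = (0, List.replicate n.toList.length ['9'], true) := by
      have := bLoop_zeros [] n.toList hall n.toList.length le_rfl []
      simpa [bLoop] using this
    simp only [removeOne, removeOne_alt, h1, h2]
    simp
  · -- n.toList = rest.reverse ++ c :: Z with c ≠ '0' and Z all '0'
    have hsplit : n.toList.reverse.takeWhile (fun c => c = '0') ++ c :: rest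
        = n.toList.reverse := by
      rw [← hD]; exact List.takeWhile_append_dropWhile
    have hLdecomp : n.toList
        = rest.reverse ++ c :: (n.toList.reverse.takeWhile (fun c => c = '0')).reverse := by
      have h := congrArg List.reverse hsplit
      simpa using h.symm
    set Z := (n.toList.reverse.takeWhile (fun c => c = '0')).reverse with hZdef
    have hZ : ∀ x ∈ Z, x = '0' := fun x hx => by
      simpa using List.mem_takeWhile_imp (List.mem_reverse.mp hx)
    have hc : ¬ (c = '0') := by
      have h := List.head_dropWhile_not (fun c => decide (c = '0'))
        (l := n.toList.reverse) (by rw [hD]; simp)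
      simp only [hD, List.head_cons, decide_eq_false_iff_not] at h
      exact h
    have hcd : c ∈ ['1', '2', '3', '4', '5', '6', '7', '8', '9'] := by
      rw [hD] at hdig; simpa using hdig
    have hfind : aLoop n.toList ((n.toList.length : Int) - 1) = rest.reverse.length := by
      rw [hLdecomp,
          show (((rest.reverse ++ c :: Z).length : Int) - 1)
             = ((rest.reverse.length : Int) + (Z.length : Int)) by
            push_cast [List.length_append, List.length_cons, List.length_reverse]; ring]
      exact_mod_cast aLoop_find rest.reverse c Z hc hZ Z.length le_rfl
    have hgetA : PySem.List.pyGetD n.toList ((rest.reverse.length : Nat) : Int) ' ' = c := by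
      rw [PySem.List.pyGetD_natCast, hLdecomp]
      simp [List.getD]
    have hstriplen : n.toList.length = rest.reverse.length + 1 + Z.length := by
      rw [hLdecomp]; simp; omega
    -- the borrow loop: eat Z as nines, then c absorbs the borrow
    have hBzeros := bLoop_zeros (rest.reverse ++ [c]) Z
      (by simpa [hLdecomp] using hZ) Z.length le_rfl []
    have hLeq : rest.reverse ++ [c] ++ Z = n.toList := by
      rw [hLdecomp]; simp
    have hBrun : bLoop n.toList n.toList.length []
        = (rest.reverse.length,
           List.replicate Z.length ['9']
             ++ [(PySem.Int.toStr ((PySem.Int.ofStr? (String.ofList [c])).getD 0 - 1)).toList],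
           false) := by
      rw [← hLeq, show (rest.reverse ++ [c] ++ Z).length = (rest.reverse ++ [c]).length + Z.length by
        simp only [List.length_append, List.length_cons, List.length_nil, List.length_reverse]]
      rw [hBzeros]
      have hlen1 : (rest.reverse ++ [c]).length = rest.reverse.length + 1 := by simp
      rw [hlen1, bLoop]
      have hget : PySem.List.pyGetD (rest.reverse ++ ([c] ++ Z)) ((rest.reverse.length : Nat) : Int) ' ' = c := by
        have hre : rest.reverse ++ ([c] ++ Z) = n.toList := by rw [← hLeq]; simp
        rw [hre]; exact hgetA
      simp only [List.append_assoc, hget, if_neg (digit_sub_nonneg c hcd)]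
      simp
    simp only [removeOne, removeOne_alt, hfind, hgetA, hBrun]
    rw [if_neg (by omega : ¬ ((rest.reverse.length : Int) = -1))]
    have hnines : ((n.toList.length : Int) - (rest.reverse.length : Int) - 1).toNat = Z.length := by
      omega
    rw [hnines]
    have hflat : (List.replicate Z.length (['9'] : List Char)
          ++ [(PySem.Int.toStr ((PySem.Int.ofStr? (String.ofList [c])).getD 0 - 1)).toList]).reverse.flatten
        = (PySem.Int.toStr ((PySem.Int.ofStr? (String.ofList [c])).getD 0 - 1)).toList
          ++ List.replicate Z.length '9' := by
      rw [List.reverse_append, List.reverse_replicate]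
      simp only [List.reverse_singleton]
      induction Z.length with
      | zero => simp
      | succ k ih => simp [List.replicate_succ]
    rw [hflat]
    have hofl : ∀ (a b : List Char), String.ofList (a ++ b) = String.ofList a ++ String.ofList b := by
      intro a b; apply String.toList_injective; simp
    have htos : String.ofList (PySem.Int.toStr ((PySem.Int.ofStr? (String.ofList [c])).getD 0 - 1)).toList
        = PySem.Int.toStr ((PySem.Int.ofStr? (String.ofList [c])).getD 0 - 1) := by
      apply String.toList_injective; simp
    by_cases hP : rest.reverse.length = 0
    · rw [if_neg (show ¬ (0 : Int) ≤ (rest.reverse.length : Int) - 1 by omega)]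
      have h0 : rest.reverse = [] := List.length_eq_zero_iff.mp hP
      rw [hP]
      simp only [List.take_zero]
      rw [hofl, htos]
      apply String.toList_injective; simp
    · rw [if_pos (show (0 : Int) ≤ (rest.reverse.length : Int) - 1 by omega),
          show ((rest.reverse.length : Int) - 1 + 1) = ((rest.reverse.length : Nat) : Int) by ring]
      apply String.toList_injective
      simp [PySem.List.slice_to_natCast, hLdecomp]
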